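-- pv_equiv track=rewrite | github.com/Bomtori/Study_codingTest | 프로그래머스/lv0/120830. 양꼬치/양꼬치.py | solution
-- ===== SOURCE A (Python) =====
-- def solution(n, k):
--     answer = 0
--     a = 0
--     for i in range(n):
--         answer += 12000
--         a += 1
--         if a == 10:
--             k -= 1
--             a = 0
--
--     k *= 2000
--     answer += k
--     return answer
-- ===== SOURCE B (Python) =====
-- def solution(n, k):
--     m = max(n, 0)
--     return 12000 * m + 2000 * (k - m // 10)
-- ===== Notes on version B (the rewrite author's own statement) =====
-- stated objective: faster
-- what changed: Replaces the per-skewer counting loop with closed-form arithmetic: 12000*max(n,0) + 2000*(k - max(n,0)//10).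
import Mathlib
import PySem

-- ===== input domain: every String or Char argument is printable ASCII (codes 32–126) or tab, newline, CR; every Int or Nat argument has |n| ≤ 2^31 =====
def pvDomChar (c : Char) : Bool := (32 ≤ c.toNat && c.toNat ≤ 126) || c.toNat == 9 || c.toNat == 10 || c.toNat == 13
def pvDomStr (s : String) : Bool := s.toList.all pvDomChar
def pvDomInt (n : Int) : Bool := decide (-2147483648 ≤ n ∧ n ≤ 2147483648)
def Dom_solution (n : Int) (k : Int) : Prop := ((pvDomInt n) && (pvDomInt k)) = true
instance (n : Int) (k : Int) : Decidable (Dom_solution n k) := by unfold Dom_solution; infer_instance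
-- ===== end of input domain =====

-- B replaces A's per-skewer loop with closed-form arithmetic (O(1) instead of O(n)).


-- ===== PORT A =====
-- loop body of A: state (answer, a, k); the loop index i is unused
def solutionStep (s : Int × Int × Int) (_i : Int) : Int × Int × Int :=
  let answer := s.1 + 12000
  let a := s.2.1 + 1
  if a == 10 then (answer, 0, s.2.2 - 1) else (answer, a, s.2.2)

def solution (n : Int) (k : Int) : Int :=
  let s := (PySem.List.pyRange 0 n 1).foldl solutionStep (0, 0, k)
  s.1 + s.2.2 * 2000

-- ===== PORT B =====
def solution_alt (n : Int) (k : Int) : Int :=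
  let m := max n 0
  12000 * m + 2000 * (k - PySem.Int.floordiv m 10)

-- ===== PRECONDITION & SPEC =====
def Spec_solution (n : Int) (k : Int) (out : Int) : Prop := out = solution_alt n k
instance (n : Int) (k : Int) (out : Int) : Decidable (Spec_solution n k out) := by unfold Spec_solution; infer_instance

-- ===== CLAIM (what is proved, stated in full; the proofs are below) =====
def Claim_equal_solution : Prop := ∀ (n : Int) (k : Int), Dom_solution n k → Spec_solution n k (solution n k)

-- ===== LEMMAS AND PROOFS =====

-- the loop body ignores the element, so the fold only depends on the list's length
theorem foldl_solutionStep_length (l : List Int) (s : Int × Int × Int) :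
    l.foldl solutionStep s = (fun t => solutionStep t 0)^[l.length] s := by
  induction l generalizing s with
  | nil => rfl
  | cons x xs ih => simp [List.foldl, Function.iterate_succ_apply, ih, solutionStep]

-- loop invariant: after m iterations from (0, 0, k)
theorem iterate_solutionStep (m : Nat) (k : Int) :
    (fun t => solutionStep t 0)^[m] (0, 0, k) = ((12000 * (m : Int), ((m % 10 : Nat) : Int), k - ((m / 10 : Nat) : Int)) : Int × Int × Int) := by
  induction m with
  | zero => simp
  | succ m ih =>
      rw [Function.iterate_succ_apply', ih]
      simp only [solutionStep, beq_iff_eq]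
      split_ifs with h
      · refine Prod.ext (by push_cast; ring) (Prod.ext ?_ ?_) <;> simp_all <;> omega
      · refine Prod.ext (by push_cast; ring) (Prod.ext ?_ ?_) <;> simp_all <;> omega

-- ===== VERDICT (by name: the statement is the Claim_ definition above) =====
theorem solution_spec : Claim_equal_solution := by
  intro n k _
  unfold Spec_solution solution solution_alt
  rw [PySem.List.pyRange_one, ← List.foldl_map, foldl_solutionStep_length]
  simp only [List.length_map, List.length_range, iterate_solutionStep]
  have h10 : PySem.Int.floordiv (max n 0) 10 = (max n 0) / 10 :=
    PySem.Int.floordiv_eq_ediv_of_pos (by omega : (0:Int) < 10)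
  rw [h10]
  omega
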